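-- pv_equiv track=rewrite | github.com/porciuscato/study_algorithm | coding_test/mit/1.py | solution
-- ===== SOURCE A (Python) =====
-- def solution(openA, closeB):
--     array = sorted([(i, 'A') for i in openA] + [(i, 'B') for i in closeB])
--     answer = 0
--     started = False
--     start_time = 0
--     for ele in array:
--         if not started and ele[1] == 'A':
--             start_time = ele[0]
--             started = True
--         elif started and ele[1] == 'B':
--             started = False
--             answer += ele[0] - start_time
--             start_time = 0
--     return answer
-- ===== SOURCE B (Python) =====
-- def solution(openA, closeB):
--     # two-pointer over separately sorted opens and closes (no merged tagged event list)
--     opens = sorted(openA)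
--     closes = sorted(closeB)
--     n, m = len(opens), len(closes)
--     i = j = 0
--     total = 0
--     while i < n and j < m:
--         start = opens[i]
--         while j < m and closes[j] < start:
--             j += 1
--         if j == m:
--             break
--         bound = closes[j]
--         total += bound - start
--         j += 1
--         i += 1
--         while i < n and opens[i] <= bound:
--             i += 1
--     return total
-- ===== Notes on version B (the rewrite author's own statement) =====
-- stated objective: faster
-- what changed: Replaces the merged tagged-event list and its started/start_time state-machine scan with two separately sorted integer lists consumed by a two-pointer loop (no tuples, no tags).
import Mathlib
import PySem

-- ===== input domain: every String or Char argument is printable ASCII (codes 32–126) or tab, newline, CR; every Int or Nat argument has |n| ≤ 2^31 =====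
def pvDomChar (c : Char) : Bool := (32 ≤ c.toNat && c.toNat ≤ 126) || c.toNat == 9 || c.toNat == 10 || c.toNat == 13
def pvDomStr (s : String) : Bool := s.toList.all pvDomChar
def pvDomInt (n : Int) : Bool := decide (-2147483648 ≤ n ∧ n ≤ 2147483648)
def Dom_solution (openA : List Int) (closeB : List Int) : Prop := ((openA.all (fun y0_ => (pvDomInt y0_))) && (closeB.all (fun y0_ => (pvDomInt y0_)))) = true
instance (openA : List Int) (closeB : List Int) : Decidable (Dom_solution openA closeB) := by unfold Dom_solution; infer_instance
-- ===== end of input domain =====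

-- B replaces A's merged tagged-event list and state-machine scan with a two-pointer
-- loop over two separately sorted integer lists (intended as a constant-factor
-- speed-up: no tuples or tag comparisons; same sort-dominated asymptotics).

-- ===== PORT A =====
-- A's for-loop over the sorted tagged array, with state (started, start_time, answer)
def solutionScan : List (Int × String) → Bool → Int → Int → Int
  | [], _, _, answer => answer
  | e :: rest, started, start_time, answer =>
    if (!started) && (e.2 == "A") then solutionScan rest true e.1 answer
    else if started && (e.2 == "B") then solutionScan rest false 0 (answer + (e.1 - start_time))
    else solutionScan rest started start_time answer

def solution (openA : List Int) (closeB : List Int) : Int :=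
  let array := PySem.List.sorted2
    (openA.map (fun i => (i, "A")) ++ closeB.map (fun i => (i, "B")))
    (fun e => e.1) (fun e => e.2)
  solutionScan array false 0 0

-- ===== PORT B =====
-- the two-pointer loop of Source B on the (suffixes of the) two sorted lists:
-- j-advance = dropWhile (< start) on the remaining closes, the matched close is its
-- head, i-advance = dropWhile (≤ bound) on the remaining opens
def altLoop : List Int → List Int → Int
  | [], _ => 0
  | _ :: _, [] => 0
  | o :: os, c :: cs =>
    match h : List.dropWhile (fun c' => decide (c' < o)) (c :: cs) with
    | [] => 0
    | c' :: cs' => (c' - o) + altLoop (List.dropWhile (fun o' => decide (o' ≤ c')) os) cs'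
termination_by _ cs => cs.length
decreasing_by
  have hlen := List.length_dropWhile_le (fun c' => decide (c' < o)) (c :: cs)
  rw [h] at hlen
  simp at hlen ⊢
  omega

def solution_alt (openA : List Int) (closeB : List Int) : Int :=
  altLoop (PySem.List.sorted openA (fun x => x)) (PySem.List.sorted closeB (fun x => x))

-- ===== PRECONDITION & SPEC =====
def Spec_solution (openA : List Int) (closeB : List Int) (out : Int) : Prop := out = solution_alt openA closeB
instance (openA : List Int) (closeB : List Int) (out : Int) : Decidable (Spec_solution openA closeB out) := by unfold Spec_solution; infer_instance

-- ===== CLAIM (what is proved, stated in full; the proofs are below) =====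
def Claim_equal_solution : Prop := ∀ (openA : List Int) (closeB : List Int), Dom_solution openA closeB → Spec_solution openA closeB (solution openA closeB)

-- ===== LEMMAS AND PROOFS =====

-- proof-side model of the sorted tagged array: the merge of the two sorted lists,
-- with the Python tie rule (an open at value v precedes a close at value v)
def pvMerge : List Int → List Int → List (Int × String)
  | [], cs => cs.map (fun c => (c, "B"))
  | o :: os, [] => (o :: os).map (fun o' => (o', "A"))
  | o :: os, c :: cs =>
    if o ≤ c then (o, "A") :: pvMerge os (c :: cs) else (c, "B") :: pvMerge (o :: os) cs
termination_by os cs => os.length + cs.length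

theorem pvMerge_perm (os cs : List Int) :
    (pvMerge os cs).Perm (os.map (fun o' => (o', "A")) ++ cs.map (fun c => (c, "B"))) := by
  induction os, cs using pvMerge.induct with
  | case1 cs => simp [pvMerge]
  | case2 o os => simp [pvMerge]
  | case3 o os c cs h ih =>
    rw [pvMerge, if_pos h]
    simpa using ih.cons (o, "A")
  | case4 o os c cs h ih =>
    rw [pvMerge, if_neg h]
    refine List.Perm.trans (ih.cons (c, "B")) ?_
    simpa using (List.perm_middle (a := (c, "B"))
      (l₁ := (o :: os).map (fun o' => (o', "A"))) (l₂ := cs.map (fun c' => (c', "B")))).symm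

theorem mem_pvMerge {x : Int × String} {os cs : List Int} (hx : x ∈ pvMerge os cs) :
    (x.2 = "A" ∧ x.1 ∈ os) ∨ (x.2 = "B" ∧ x.1 ∈ cs) := by
  have := (pvMerge_perm os cs).mem_iff.mp hx
  rcases List.mem_append.mp this with h | h
  · rcases List.mem_map.mp h with ⟨v, hv, rfl⟩; exact Or.inl ⟨rfl, hv⟩
  · rcases List.mem_map.mp h with ⟨v, hv, rfl⟩; exact Or.inr ⟨rfl, hv⟩

theorem pvMerge_pairwise {os cs : List Int}
    (hos : os.Pairwise (· ≤ ·)) (hcs : cs.Pairwise (· ≤ ·)) :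
    (pvMerge os cs).Pairwise (fun a b => toLex a ≤ toLex b) := by
  induction os, cs using pvMerge.induct with
  | case1 cs =>
    simp only [pvMerge]
    refine List.pairwise_map.mpr (hcs.imp ?_)
    intro a b hab
    refine Prod.Lex.toLex_le_toLex.mpr ?_
    rcases lt_or_eq_of_le hab with h | h
    · exact Or.inl h
    · exact Or.inr ⟨h, le_refl _⟩
  | case2 o os =>
    simp only [pvMerge]
    refine List.pairwise_map.mpr (hos.imp ?_)
    intro a b hab
    refine Prod.Lex.toLex_le_toLex.mpr ?_
    rcases lt_or_eq_of_le hab with h | h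
    · exact Or.inl h
    · exact Or.inr ⟨h, le_refl _⟩
  | case3 o os c cs h ih =>
    rw [pvMerge, if_pos h]
    rcases List.pairwise_cons.mp hos with ⟨ho, hos'⟩
    refine List.pairwise_cons.mpr ⟨?_, ih hos' hcs⟩
    intro y hy
    rcases mem_pvMerge hy with ⟨ht, hm⟩ | ⟨ht, hm⟩
    · have : o ≤ y.1 := ho _ hm
      refine Prod.Lex.toLex_le_toLex.mpr ?_
      rcases lt_or_eq_of_le this with h' | h'
      · exact Or.inl h'
      · exact Or.inr ⟨h', by rw [ht]⟩
    · have hc : c ≤ y.1 := by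
        rcases List.mem_cons.mp hm with rfl | hm'
        · exact le_refl _
        · exact (List.pairwise_cons.mp hcs).1 _ hm'
      have : o ≤ y.1 := le_trans h hc
      refine Prod.Lex.toLex_le_toLex.mpr ?_
      rcases lt_or_eq_of_le this with h' | h'
      · exact Or.inl h'
      · refine Or.inr ⟨h', ?_⟩
        rw [ht]
        show ("A" : String) ≤ "B"
        exact String.le_iff_toList_le.mpr (by decide)
  | case4 o os c cs h ih =>
    rw [pvMerge, if_neg h]
    rcases List.pairwise_cons.mp hcs with ⟨hc, hcs'⟩
    refine List.pairwise_cons.mpr ⟨?_, ih hos hcs'⟩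
    intro y hy
    rcases mem_pvMerge hy with ⟨ht, hm⟩ | ⟨ht, hm⟩
    · have ho : o ≤ y.1 := by
        rcases List.mem_cons.mp hm with rfl | hm'
        · exact le_refl _
        · exact (List.pairwise_cons.mp hos).1 _ hm'
      exact Prod.Lex.toLex_le_toLex.mpr (Or.inl (lt_of_lt_of_le (by omega) ho))
    · have : c ≤ y.1 := hc _ hm
      refine Prod.Lex.toLex_le_toLex.mpr ?_
      rcases lt_or_eq_of_le this with h' | h'
      · exact Or.inl h'
      · exact Or.inr ⟨h', by rw [ht]⟩

-- the sorted2 tuple order on (Int, tag) pairs is the lexicographic order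
theorem lt2_eq (a b : Int × String) :
    (decide (a.1 < b.1) || (!decide (b.1 < a.1) && decide (a.2 < b.2)))
      = decide (toLex a < toLex b) := by
  have hlex : (toLex a < toLex b) ↔ (a.1 < b.1 ∨ (a.1 = b.1 ∧ a.2 < b.2)) :=
    Prod.Lex.toLex_lt_toLex
  rcases lt_trichotomy a.1 b.1 with h | h | h
  · simp [hlex, h, not_lt_of_gt h]
  · simp [hlex, h]
  · have h1 : ¬ a.1 < b.1 := not_lt_of_gt h
    have h2 : a.1 ≠ b.1 := ne_of_gt h
    simp [hlex, not_lt_of_gt h, h2]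
    intro hle
    omega

theorem sorted2_eq_sorted_toLex (xs : List (Int × String)) :
    PySem.List.sorted2 xs (fun e => e.1) (fun e => e.2)
      = PySem.List.sorted xs (fun e => toLex e) := by
  have hfun : (fun (a b : Int × String) =>
      decide (a.1 < b.1) || (!decide (b.1 < a.1) && decide (a.2 < b.2)))
      = (fun (a b : Int × String) => decide (toLex a < toLex b)) := by
    funext a b; exact lt2_eq a b
  simp only [PySem.List.sorted2, PySem.List.sorted]
  rw [hfun]
  simp

-- the sorted tagged array IS the merge of the two sorted lists
theorem sorted_tagged_eq_pvMerge (openA closeB : List Int) :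
    PySem.List.sorted2
      (openA.map (fun i => (i, "A")) ++ closeB.map (fun i => (i, "B")))
      (fun e => e.1) (fun e => e.2)
    = pvMerge (PySem.List.sorted openA (fun x => x)) (PySem.List.sorted closeB (fun x => x)) := by
  rw [sorted2_eq_sorted_toLex]
  refine PySem.List.eq_of_perm_of_pairwise_le_of_injective
    (κ := Lex (Int × String)) (fun e => toLex e) (fun a b h => h) ?_ ?_ ?_
  · refine (PySem.List.sorted_perm _ _ _).trans (List.Perm.symm ?_)
    refine (pvMerge_perm _ _).trans ?_
    exact List.Perm.append
      (((PySem.List.sorted_perm openA (fun x => x) false)).map _)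
      (((PySem.List.sorted_perm closeB (fun x => x) false)).map _)
  · exact PySem.List.sorted_pairwise _ _
  · exact pvMerge_pairwise (PySem.List.sorted_pairwise _ _) (PySem.List.sorted_pairwise _ _)

-- A's scan over an all-close tail does nothing while not started
theorem scan_allB (cs : List Int) (st ans : Int) :
    solutionScan (cs.map (fun c => (c, "B"))) false st ans = ans := by
  induction cs generalizing st ans with
  | nil => rfl
  | cons c cs ih => simpa [solutionScan] using ih st ans

-- A's scan over an all-open tail adds nothing (whatever the state)
theorem scan_allA (os : List Int) (started : Bool) (st ans : Int) :
    solutionScan (os.map (fun o' => (o', "A"))) started st ans = ans := by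
  induction os generalizing started st ans with
  | nil => rfl
  | cons o os ih => cases started <;> simp [solutionScan, ih]

-- while started: A ignores opens up to the next close c, closes there, and the
-- remaining merge restarts past the opens ≤ c
theorem scan_started (os : List Int) (c : Int) (cs : List Int) (st ans : Int) :
    solutionScan (pvMerge os (c :: cs)) true st ans
      = solutionScan (pvMerge (os.dropWhile (fun o' => decide (o' ≤ c))) cs) false 0 (ans + (c - st)) := by
  induction os with
  | nil => simp [pvMerge, solutionScan]
  | cons o os ih =>
    by_cases h : o ≤ c
    · rw [pvMerge, if_pos h]
      simpa [solutionScan, h] using ih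
    · rw [pvMerge, if_neg h]
      simp [solutionScan, h]

-- while not started: A ignores closes below the next open o
theorem scan_skipB (o : Int) (os : List Int) (cs : List Int) (ans : Int) :
    solutionScan (pvMerge (o :: os) cs) false 0 ans
      = solutionScan (pvMerge (o :: os) (cs.dropWhile (fun c' => decide (c' < o)))) false 0 ans := by
  induction cs with
  | nil => rfl
  | cons c cs ih =>
    by_cases h : c < o
    · rw [pvMerge, if_neg (by omega)]
      simpa [solutionScan, List.dropWhile_cons, h] using ih
    · simp [h]

-- the head of a nonempty dropWhile result fails the predicate
theorem dropWhile_head_false {α : Type} {p : α → Bool} {l r : List α} {x : α}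
    (h : List.dropWhile p l = x :: r) : p x = false := by
  induction l with
  | nil => cases h
  | cons a l ih =>
    rw [List.dropWhile_cons] at h
    split at h
    · exact ih h
    · cases h
      rename_i hp
      simpa using hp

theorem altLoop_eq_zero {o : Int} {os c cs} 
    (h : List.dropWhile (fun c' => decide (c' < o)) (c :: cs) = []) :
    altLoop (o :: os) (c :: cs) = 0 := by
  rw [altLoop]
  split
  · rfl
  · rename_i c'' cs'' h'
    rw [h] at h'
    cases h'

theorem altLoop_eq_cons {o : Int} {os c cs c' cs'}
    (h : List.dropWhile (fun c'' => decide (c'' < o)) (c :: cs) = c' :: cs') :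
    altLoop (o :: os) (c :: cs)
      = (c' - o) + altLoop (List.dropWhile (fun o' => decide (o' ≤ c')) os) cs' := by
  rw [altLoop]
  split
  · rename_i h'
    rw [h] at h'
    cases h'
  · rename_i c'' cs'' h'
    rw [h] at h'
    cases h'
    rfl

-- main: A's scan of the merge computes B's two-pointer loop
theorem scan_pvMerge_eq_altLoop (cs os : List Int) (ans : Int) :
    solutionScan (pvMerge os cs) false 0 ans = ans + altLoop os cs := by
  induction hn : cs.length using Nat.strong_induction_on generalizing cs os ans with
  | _ n ih =>
  subst hn
  match os, cs with
  | [], cs => simp [pvMerge, scan_allB, altLoop]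
  | o :: os, [] =>
    rw [pvMerge, scan_allA]
    simp [altLoop]
  | o :: os, c :: cs =>
    rw [scan_skipB]
    rcases hdw : (c :: cs).dropWhile (fun c' => decide (c' < o)) with _ | ⟨c', cs'⟩
    · rw [pvMerge, scan_allA, altLoop_eq_zero hdw]
      simp
    · have hoc : o ≤ c' := by
        have := dropWhile_head_false hdw
        simpa using this
      have hlen : cs'.length < (c :: cs).length := by
        have := List.length_dropWhile_le (fun c'' => decide (c'' < o)) (c :: cs)
        rw [hdw] at this
        simp at this ⊢
        omega
      rw [pvMerge, if_pos hoc, solutionScan]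
      simp only [Bool.not_false, beq_self_eq_true, Bool.and_self, if_true]
      rw [scan_started, ih cs'.length (by simpa using hlen) cs' _ _ rfl,
        altLoop_eq_cons hdw]
      ring

-- ===== VERDICT (by name: the statement is the Claim_ definition above) =====
theorem solution_spec : Claim_equal_solution := by
  intro openA closeB _
  unfold Spec_solution solution solution_alt
  rw [sorted_tagged_eq_pvMerge, scan_pvMerge_eq_altLoop]
  ring
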